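-- pv_equiv track=rewrite | github.com/jaynamm/break_algorithm | 프로그래머스/2/150369. 택배 배달과 수거하기/택배 배달과 수거하기.py | solution
-- ===== SOURCE A (Python) =====
-- def solution(cap, n, deliveries, pickups):
--     answer = 0
--
--     d_cap = 0
--     p_cap = 0
--
--     for i in range(n-1, -1, -1):
--         cnt  = 0
--
--         d_cap -= deliveries[i]
--         p_cap -= pickups[i]
--
--         while d_cap < 0 or p_cap < 0:
--             d_cap += cap
--             p_cap += cap
--             cnt += 1
--
--         answer += (i+1) * cnt * 2
--
--     return answer
-- ===== SOURCE B (Python) =====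
-- def solution(cap, n, deliveries, pickups):
--     answer = 0
--     d_cap = 0
--     p_cap = 0
--     for i in range(n - 1, -1, -1):
--         d_cap -= deliveries[i]
--         p_cap -= pickups[i]
--         # closed-form number of trips instead of A's repeated top-up loop
--         need = max(-d_cap, -p_cap)
--         cnt = max(0, -(-need // cap))
--         d_cap += cnt * cap
--         p_cap += cnt * cap
--         answer += (i + 1) * cnt * 2
--     return answer
-- ===== Notes on version B (the rewrite author's own statement) =====
-- stated objective: simpler
-- what changed: The inner while loop that tops up capacity one truckload at a time is replaced by a single closed-form ceiling-division trip count per house.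
-- outside the precondition, e.g. on solution(0, 1, [0], [0]): A returns 0, B raises ZeroDivisionError; on solution(-1, 1, [0], [0]): A returns 0, B returns 0
import Mathlib
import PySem

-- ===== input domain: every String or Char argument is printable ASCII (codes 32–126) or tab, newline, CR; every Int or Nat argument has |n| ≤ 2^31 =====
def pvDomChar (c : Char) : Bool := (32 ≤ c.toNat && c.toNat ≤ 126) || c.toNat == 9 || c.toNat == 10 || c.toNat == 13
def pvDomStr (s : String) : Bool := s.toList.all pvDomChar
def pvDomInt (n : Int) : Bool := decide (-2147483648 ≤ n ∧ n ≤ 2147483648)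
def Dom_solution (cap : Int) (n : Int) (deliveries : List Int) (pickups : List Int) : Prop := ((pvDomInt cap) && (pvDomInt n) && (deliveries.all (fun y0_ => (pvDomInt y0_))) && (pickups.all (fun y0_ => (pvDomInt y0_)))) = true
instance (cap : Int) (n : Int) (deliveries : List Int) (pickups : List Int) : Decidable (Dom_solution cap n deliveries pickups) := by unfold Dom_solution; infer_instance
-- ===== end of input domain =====

-- B replaces A's one-truckload-at-a-time inner while loop by a closed-form ceiling-division
-- trip count per house (objective: simpler).

-- ===== PORT A =====
-- A's inner 'while d_cap < 0 or p_cap < 0' loop; the fuel argument is only a totalizing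
-- guard (under Pre_ 0 < cap the supplied fuel is provably sufficient, see pvTopUp_closed).
def pvTopUp (cap : Int) : Nat → Int × Int × Int → Int × Int × Int
  | 0, s => s
  | fuel+1, (d, p, cnt) =>
    if d < 0 ∨ p < 0 then pvTopUp cap fuel (d + cap, p + cap, cnt + 1) else (d, p, cnt)

def solution (cap : Int) (n : Int) (deliveries : List Int) (pickups : List Int) : Int :=
  -- pyGetD default 0 is a totalizing guard: Pre_ keeps every index in range
  (((PySem.List.pyRange (n-1) (-1) (-1)).foldl
    (fun (s : Int × Int × Int) (i : Int) =>
      let d := s.2.1 - PySem.List.pyGetD deliveries i 0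
      let p := s.2.2 - PySem.List.pyGetD pickups i 0
      let t := pvTopUp cap ((max (-d) (-p)).toNat + 1) (d, p, 0)
      (s.1 + (i+1) * t.2.2 * 2, t.1, t.2.1))
    (0, 0, 0))).1

-- ===== PORT B =====
def solution_alt (cap : Int) (n : Int) (deliveries : List Int) (pickups : List Int) : Int :=
  (((PySem.List.pyRange (n-1) (-1) (-1)).foldl
    (fun (s : Int × Int × Int) (i : Int) =>
      let d := s.2.1 - PySem.List.pyGetD deliveries i 0
      let p := s.2.2 - PySem.List.pyGetD pickups i 0
      let need := max (-d) (-p)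
      let cnt := max 0 (-(PySem.Int.floordiv (-need) cap))
      (s.1 + (i+1) * cnt * 2, d + cnt * cap, p + cnt * cap))
    (0, 0, 0))).1

-- ===== PRECONDITION & SPEC =====
-- Pre_ excludes n larger than a list (IndexError in A) and non-positive cap when n > 0:
-- there A's top-up loop diverges for any positive load and B floor-divides by cap
-- (ZeroDivisionError at cap = 0).
def Pre_solution (cap : Int) (n : Int) (deliveries : List Int) (pickups : List Int) : Prop :=
  (0 < cap ∨ n ≤ 0) ∧ n ≤ (deliveries.length : Int) ∧ n ≤ (pickups.length : Int)
instance (cap : Int) (n : Int) (deliveries : List Int) (pickups : List Int) : Decidable (Pre_solution cap n deliveries pickups) := by unfold Pre_solution; infer_instance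

def pvWitness_solution : Int × Int × List Int × List Int := (4, 2, [2, 3], [1, 2])

def Spec_solution (cap : Int) (n : Int) (deliveries : List Int) (pickups : List Int) (out : Int) : Prop := out = solution_alt cap n deliveries pickups
instance (cap : Int) (n : Int) (deliveries : List Int) (pickups : List Int) (out : Int) : Decidable (Spec_solution cap n deliveries pickups out) := by unfold Spec_solution; infer_instance

-- ===== CLAIM (what is proved, stated in full; the proofs are below) =====
def Claim_equal_solution : Prop := ∀ (cap : Int) (n : Int) (deliveries : List Int) (pickups : List Int), Dom_solution cap n deliveries pickups → Pre_solution cap n deliveries pickups → Spec_solution cap n deliveries pickups (solution cap n deliveries pickups)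

-- ===== LEMMAS AND PROOFS =====

-- Bracket characterization of B's ceiling division -((-need) // cap) for 0 < cap.
theorem pvCeil_bracket (cap need : Int) (hcap : 0 < cap) :
    ((-(PySem.Int.floordiv (-need) cap)) - 1) * cap < need ∧
      need ≤ (-(PySem.Int.floordiv (-need) cap)) * cap :=
  (PySem.Int.neg_floordiv_neg_eq_iff_of_pos hcap).mp rfl

-- A's while loop computes the closed form, given sufficient fuel.
theorem pvTopUp_closed (cap : Int) (hcap : 0 < cap) :
    ∀ (fuel : Nat) (d p c : Int),
      (max 0 (-(PySem.Int.floordiv (-(max (-d) (-p))) cap))).toNat ≤ fuel →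
      pvTopUp cap fuel (d, p, c) =
        (d + (max 0 (-(PySem.Int.floordiv (-(max (-d) (-p))) cap))) * cap,
         p + (max 0 (-(PySem.Int.floordiv (-(max (-d) (-p))) cap))) * cap,
         c + (max 0 (-(PySem.Int.floordiv (-(max (-d) (-p))) cap)))) := by
  intro fuel
  induction fuel with
  | zero =>
    intro d p c hfuel
    set C := -(PySem.Int.floordiv (-(max (-d) (-p))) cap) with hC
    have hK : max 0 C = 0 := by omega
    simp [pvTopUp, hK]
  | succ fuel ih =>
    intro d p c hfuel
    set C := -(PySem.Int.floordiv (-(max (-d) (-p))) cap) with hC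
    obtain ⟨hlt, hle⟩ := pvCeil_bracket cap (max (-d) (-p)) hcap
    by_cases hneg : d < 0 ∨ p < 0
    · -- need > 0, so C ≥ 1
      have hneed : 0 < max (-d) (-p) := by omega
      have hC1 : 1 ≤ C := by nlinarith [hle]
      -- the shifted residuals have ceiling count C - 1
      have hshift : -(PySem.Int.floordiv (-(max (-(d + cap)) (-(p + cap)))) cap) = C - 1 := by
        have : max (-(d + cap)) (-(p + cap)) = max (-d) (-p) - cap := by omega
        rw [this]
        exact (PySem.Int.neg_floordiv_neg_eq_iff_of_pos hcap).mpr (by constructor <;> nlinarith)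
      have := ih (d + cap) (p + cap) (c + 1) (by rw [hshift]; omega)
      rw [hshift] at this
      simp only [pvTopUp, if_pos hneg, this]
      have h1 : max 0 (C - 1) = C - 1 := by omega
      have h2 : max 0 C = C := by omega
      rw [h1, h2]
      simp only [Prod.mk.injEq]
      exact ⟨by ring, by ring, by ring⟩
    · -- both residuals non-negative: C ≤ 0
      have hneed : max (-d) (-p) ≤ 0 := by omega
      have hC0 : C ≤ 0 := by nlinarith [hlt]
      have hK : max 0 C = 0 := by omega
      simp [pvTopUp, hneg, hK]

-- The fuel A's port supplies is sufficient.
theorem pvFuel_enough (cap need : Int) (hcap : 0 < cap) :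
    (max 0 (-(PySem.Int.floordiv (-need) cap))).toNat ≤ need.toNat + 1 := by
  obtain ⟨hlt, hle⟩ := pvCeil_bracket cap need hcap
  set C := -(PySem.Int.floordiv (-need) cap) with hC
  by_cases h1 : 1 ≤ C
  · have : C - 1 ≤ (C - 1) * cap := le_mul_of_one_le_right (by omega) (by omega)
    omega
  · omega

-- The two folds agree step by step when 0 < cap.
theorem pvFold_eq (cap : Int) (hcap : 0 < cap) (deliveries pickups : List Int) :
    ∀ (l : List Int) (s : Int × Int × Int),
      l.foldl (fun (s : Int × Int × Int) (i : Int) =>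
        let d := s.2.1 - PySem.List.pyGetD deliveries i 0
        let p := s.2.2 - PySem.List.pyGetD pickups i 0
        let t := pvTopUp cap ((max (-d) (-p)).toNat + 1) (d, p, 0)
        (s.1 + (i+1) * t.2.2 * 2, t.1, t.2.1)) s =
      l.foldl (fun (s : Int × Int × Int) (i : Int) =>
        let d := s.2.1 - PySem.List.pyGetD deliveries i 0
        let p := s.2.2 - PySem.List.pyGetD pickups i 0
        let need := max (-d) (-p)
        let cnt := max 0 (-(PySem.Int.floordiv (-need) cap))
        (s.1 + (i+1) * cnt * 2, d + cnt * cap, p + cnt * cap)) s := by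
  intro l
  induction l with
  | nil => intro s; rfl
  | cons i l ih =>
    intro s
    simp only [List.foldl_cons]
    rw [pvTopUp_closed cap hcap _ _ _ 0
      (pvFuel_enough cap _ hcap)]
    simp only [zero_add]
    exact ih _

-- ===== VERDICT (by name: the statement is the Claim_ definition above) =====
theorem solution_spec : Claim_equal_solution := by
  intro cap n deliveries pickups _hdom hpre
  unfold Spec_solution solution solution_alt
  rcases hpre.1 with hcap | hn
  · exact congrArg Prod.fst (pvFold_eq cap hcap deliveries pickups _ _)
  · rw [PySem.List.pyRange_neg_one_eq_nil (by omega)]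
    rfl
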